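-- pv_equiv track=rewrite | github.com/martin2000002/Inteligencia-Artificial | Deber 2/ejercicio_2/utils/io.py | board_to_text_grid
-- ===== SOURCE A (Python) =====
-- from typing import List
--
-- Board = List[int]
--
-- def board_to_text_grid(board: Board) -> str:
--     n = len(board)
--     rows = []
--     for r in range(n):
--         row = ["."] * n
--         c = board[r]
--         if 0 <= c < n:
--             row[c] = "Q"
--         rows.append(" ".join(row))
--     return "\n".join(rows)
-- ===== SOURCE B (Python) =====
-- def board_to_text_grid(board):
--     n = len(board)
--     if n == 0:
--         return ""
--     # Build one all-dots template of the whole grid, then patch the queen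
--     # positions in place: row r starts at flat offset r*2n, column c at +2c.
--     grid = list("\n".join([" ".join(["."] * n)] * n))
--     for r, c in enumerate(board):
--         if 0 <= c < n:
--             grid[2 * n * r + 2 * c] = "Q"
--     return "".join(grid)
-- ===== Notes on version B (the rewrite author's own statement) =====
-- stated objective: alternative
-- what changed: Instead of constructing each row as a per-cell list that is mutated and joined, B builds the entire all-dots grid once as a single flat character buffer (template string) and then patches each queen in place at its computed flat offset 2*n*r + 2*c.
import Mathlib
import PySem

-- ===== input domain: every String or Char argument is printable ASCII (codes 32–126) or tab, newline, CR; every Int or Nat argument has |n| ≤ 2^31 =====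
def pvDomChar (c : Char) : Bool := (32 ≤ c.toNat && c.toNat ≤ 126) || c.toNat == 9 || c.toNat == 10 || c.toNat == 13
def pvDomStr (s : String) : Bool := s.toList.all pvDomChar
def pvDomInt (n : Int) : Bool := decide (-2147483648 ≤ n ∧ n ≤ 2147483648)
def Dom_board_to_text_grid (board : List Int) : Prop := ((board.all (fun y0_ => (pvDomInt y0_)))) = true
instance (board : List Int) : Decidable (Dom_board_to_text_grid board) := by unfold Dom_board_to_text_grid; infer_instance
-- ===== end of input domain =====

-- B builds the whole all-dots grid as one flat character template once, then patches
-- the queen positions in place at computed flat offsets, instead of constructing each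
-- row cell by cell (objective: alternative).

-- ===== PORT A =====
-- literal port: for r in range(n): row = ["."]*n; c = board[r]; if 0<=c<n: row[c]="Q";
-- rows.append(" ".join(row)); return "\n".join(rows).  board[r] is always in range
-- (0 ≤ r < n), so the total pyGetD/pySetD forms are exact here.
def board_to_text_grid (board : List Int) : String :=
  let n : Int := (board.length : Int)
  let rows : List String :=
    (PySem.List.pyRange 0 n 1).foldl
      (fun rows r =>
        let row := PySem.List.pyRepeat ["."] n
        let c := PySem.List.pyGetD board r 0
        let row := if 0 ≤ c ∧ c < n then PySem.List.pySetD row c "Q" else row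
        rows ++ [PySem.Str.join " " row]) []
  PySem.Str.join "\n" rows

-- ===== PORT B =====
-- literal port of Source B: grid = list("\n".join([" ".join(["."]*n)]*n)); then for
-- r, c in enumerate(board): if 0 <= c < n: grid[2*n*r + 2*c] = "Q"; "".join(grid).
-- The in-range indices make the total pySetD form exact; list/"".join is toList/ofList.
def board_to_text_grid_alt (board : List Int) : String :=
  let n := board.length
  if n = 0 then "" else
  let grid : List Char :=
    (PySem.Str.join "\n" (List.replicate n (PySem.Str.join " " (List.replicate n ".")))).toList
  let grid :=
    (PySem.List.enumerate board 0).foldl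
      (fun g rc =>
        if 0 ≤ rc.2 ∧ rc.2 < (n : Int) then
          PySem.List.pySetD g (2 * (n : Int) * rc.1 + 2 * rc.2) 'Q'
        else g) grid
  String.ofList grid

-- ===== PRECONDITION & SPEC =====
def Spec_board_to_text_grid (board : List Int) (out : String) : Prop := out = board_to_text_grid_alt board
instance (board : List Int) (out : String) : Decidable (Spec_board_to_text_grid board out) := by unfold Spec_board_to_text_grid; infer_instance

-- ===== CLAIM (what is proved, stated in full; the proofs are below) =====
def Claim_equal_board_to_text_grid : Prop := ∀ (board : List Int), Dom_board_to_text_grid board → Spec_board_to_text_grid board (board_to_text_grid board)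

-- ===== LEMMAS AND PROOFS =====

-- the all-dots row of n cells, at character level
def pvDotRow (n : Nat) : List Char := PySem.Chars.join [' '] (List.replicate n ['.'])

-- the row A produces for queen column c, at character level
def pvRowA (n : Nat) (c : Int) : List Char :=
  if 0 ≤ c ∧ c < (n : Int) then
    PySem.Chars.join [' '] ((List.replicate n ['.']).set c.toNat ['Q'])
  else pvDotRow n

theorem pv_dotrow_succ (m : Nat) (hm : 0 < m) :
    pvDotRow (m + 1) = '.' :: ' ' :: pvDotRow m := by
  obtain ⟨x, xs, hx⟩ : ∃ x xs, List.replicate m (['.'] : List Char) = x :: xs :=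
    List.exists_cons_of_ne_nil (by simp; omega)
  unfold pvDotRow
  rw [List.replicate_succ, hx, PySem.Chars.join_cons_cons, ← hx]
  rfl

theorem pv_length_dotrow (n : Nat) : (pvDotRow n).length = 2 * n - 1 := by
  induction n with
  | zero => rfl
  | succ m ih =>
      rcases Nat.eq_zero_or_pos m with h | h
      · subst h; rfl
      · rw [pv_dotrow_succ m h]; simp [ih]; omega

-- A's set-a-cell-then-join row equals B's patch-the-template row
theorem pv_set_dotrow (n k : Nat) (hk : k < n) :
    PySem.Chars.join [' '] ((List.replicate n ['.']).set k ['Q'])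
      = (pvDotRow n).set (2 * k) 'Q' := by
  induction n generalizing k with
  | zero => omega
  | succ m ih =>
      cases k with
      | zero =>
          rcases Nat.eq_zero_or_pos m with h | h
          · subst h; rfl
          · rw [List.replicate_succ, List.set_cons_zero, pv_dotrow_succ m h]
            obtain ⟨x, xs, hx⟩ : ∃ x xs, List.replicate m (['.'] : List Char) = x :: xs :=
              List.exists_cons_of_ne_nil (by simp; omega)
            rw [hx, PySem.Chars.join_cons_cons, ← hx]
            rfl
      | succ k =>
          have hk' : k < m := by omega
          have hm : 0 < m := by omega
          rw [List.replicate_succ, List.set_cons_succ, pv_dotrow_succ m hm]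
          obtain ⟨y, ys, hy⟩ : ∃ y ys, (List.replicate m (['.'] : List Char)).set k ['Q'] = y :: ys :=
            List.exists_cons_of_ne_nil (by simp; omega)
          rw [hy, PySem.Chars.join_cons_cons, ← hy, ih k hk']
          have : 2 * (k + 1) = (2 * k) + 1 + 1 := by omega
          rw [this, List.set_cons_succ, List.set_cons_succ]
          rfl

-- setting a character inside row number `done.length` of the newline-joined grid
theorem pv_set_join (L : Nat) (done rest : List (List Char)) (row : List Char) (j : Nat)
    (a : Char) (hd : ∀ x ∈ done, x.length = L) (hj : j < row.length) :
    (PySem.Chars.join ['\n'] (done ++ row :: rest)).set (done.length * (L + 1) + j) a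
      = PySem.Chars.join ['\n'] (done ++ row.set j a :: rest) := by
  induction done with
  | nil =>
      cases rest with
      | nil => simp [PySem.Chars.join_singleton]
      | cons r rs =>
          simp only [List.nil_append, PySem.Chars.join_cons_cons, List.length_nil]
          rw [List.append_assoc, List.append_assoc, Nat.zero_mul, Nat.zero_add,
            List.set_append_left j a hj]
  | cons d ds ih =>
      obtain ⟨y, ys, hy⟩ : ∃ y ys, ds ++ row :: rest = y :: ys :=
        List.exists_cons_of_ne_nil (by simp)
      have hdL : d.length = L := hd d (by simp)
      have hlen : d.length ≤ (d :: ds).length * (L + 1) + j := by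
        have h1 : L + 1 ≤ (d :: ds).length * (L + 1) :=
          Nat.le_mul_of_pos_left _ (by simp)
        omega
      simp only [List.cons_append]
      rw [hy, PySem.Chars.join_cons_cons, ← hy]
      obtain ⟨y', ys', hy'⟩ : ∃ y' ys', ds ++ row.set j a :: rest = y' :: ys' :=
        List.exists_cons_of_ne_nil (by simp)
      rw [hy', PySem.Chars.join_cons_cons, ← hy']
      rw [List.append_assoc, List.set_append_right _ a (by simpa [hdL] using hlen)]
      have harith : (d :: ds).length * (L + 1) + j - d.length
          = 1 + (ds.length * (L + 1) + j) := by
        simp [hdL]; ring_nf; omega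
      rw [harith]
      have hcons : ((['\n'] : List Char) ++ PySem.Chars.join ['\n'] (ds ++ row :: rest)).set
          (1 + (ds.length * (L + 1) + j)) a
          = '\n' :: (PySem.Chars.join ['\n'] (ds ++ row :: rest)).set
              (ds.length * (L + 1) + j) a := by
        rw [List.singleton_append, Nat.add_comm 1, List.set_cons_succ]
      rw [hcons, ih (fun x hx => hd x (by simp [hx]))]
      simp

theorem pv_length_pvRowA (n : Nat) (c : Int) : (pvRowA n c).length = 2 * n - 1 := by
  unfold pvRowA
  split_ifs with h
  · rw [pv_set_dotrow n c.toNat (by omega)]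
    simp [pv_length_dotrow]
  · exact pv_length_dotrow n

-- B's fold over enumerate turns the replicated template into the per-row grid
theorem pv_fold_invariant (n : Nat) (hn : 0 < n) (bs : List Int) (done : List (List Char))
    (hd : ∀ x ∈ done, x.length = 2 * n - 1) :
    (PySem.List.enumerate bs (done.length : Int)).foldl
      (fun g rc =>
        if 0 ≤ rc.2 ∧ rc.2 < (n : Int) then
          PySem.List.pySetD g (2 * (n : Int) * rc.1 + 2 * rc.2) 'Q'
        else g)
      (PySem.Chars.join ['\n'] (done ++ List.replicate bs.length (pvDotRow n)))
      = PySem.Chars.join ['\n'] (done ++ bs.map (pvRowA n)) := by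
  induction bs generalizing done with
  | nil => simp
  | cons c cs ih =>
      rw [PySem.List.enumerate_cons, List.foldl_cons]
      have hstep :
          (if 0 ≤ c ∧ c < (n : Int) then
            PySem.List.pySetD
              (PySem.Chars.join ['\n'] (done ++ List.replicate (c :: cs).length (pvDotRow n)))
              (2 * (n : Int) * (done.length : Int) + 2 * c) 'Q'
          else PySem.Chars.join ['\n'] (done ++ List.replicate (c :: cs).length (pvDotRow n)))
          = PySem.Chars.join ['\n'] ((done ++ [pvRowA n c]) ++ List.replicate cs.length (pvDotRow n)) := by
        rw [List.length_cons, List.replicate_succ]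
        split_ifs with h
        · have hnn : (0 : Int) ≤ 2 * (n : Int) * (done.length : Int) + 2 * c := by
            have h0 : (0 : Int) ≤ 2 * (n : Int) * (done.length : Int) := by positivity
            omega
          rw [PySem.List.pySetD_of_nonneg _ _ hnn]
          have hidx : (2 * (n : Int) * (done.length : Int) + 2 * c).toNat
              = done.length * ((2 * n - 1) + 1) + 2 * c.toNat := by
            have h2 : (2 * n - 1) + 1 = 2 * n := by omega
            have h3 : (2 * (n : Int) * (done.length : Int))
                = ((done.length * (2 * n) : Nat) : Int) := by push_cast; ring
            rw [h2, h3]; omega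
          rw [hidx, pv_set_join (2 * n - 1) done _ (pvDotRow n) (2 * c.toNat) 'Q' hd
                (by rw [pv_length_dotrow]; omega)]
          rw [← pv_set_dotrow n c.toNat (by omega)]
          have : pvRowA n c = PySem.Chars.join [' '] ((List.replicate n ['.']).set c.toNat ['Q']) := by
            unfold pvRowA; rw [if_pos h]
          rw [this, List.append_assoc]
          rfl
        · have : pvRowA n c = pvDotRow n := by unfold pvRowA; rw [if_neg h]
          rw [this, List.append_assoc]
          rfl
      rw [hstep]
      have hd' : ∀ x ∈ done ++ [pvRowA n c], x.length = 2 * n - 1 := by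
        intro x hx
        rcases List.mem_append.mp hx with h | h
        · exact hd x h
        · simp at h; subst h; exact pv_length_pvRowA n c
      have := ih (done ++ [pvRowA n c]) hd'
      simp only [List.length_append, List.length_cons, List.length_nil] at this ⊢
      rw [show ((done.length + (0 + 1) : Nat) : Int) = (done.length : Int) + 1 by push_cast; ring] at this
      rw [this, List.append_assoc]
      rfl

-- ===== VERDICT (by name: the statement is the Claim_ definition above) =====
theorem board_to_text_grid_spec : Claim_equal_board_to_text_grid := by
  intro board _
  unfold Spec_board_to_text_grid board_to_text_grid board_to_text_grid_alt
  simp only []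
  rcases Nat.eq_zero_or_pos board.length with hn | hn
  · rw [List.eq_nil_of_length_eq_zero hn]
    rfl
  · rw [if_neg (by omega)]
    -- A side: fold over pyRange with pyGetD = fold over the list, producing a map
    rw [PySem.List.foldl_pyRange_zero_pyGetD' board 0
          (fun rows c => rows ++ [PySem.Str.join " "
            (if 0 ≤ c ∧ c < (board.length : Int)
             then PySem.List.pySetD (PySem.List.pyRepeat ["."] (board.length : Int)) c "Q"
             else PySem.List.pyRepeat ["."] (board.length : Int))]) [],
        PySem.List.foldl_append_singleton_eq_map]
    apply String.toList_injective
    simp only [List.nil_append, PySem.Str.toList_join, String.toList_ofList, List.map_map,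
      List.map_replicate]
    rw [show "\n".toList = ['\n'] from by decide, show " ".toList = [' '] from by decide,
      show ".".toList = ['.'] from by decide]
    -- B side: the template is the replicated dot row, then the fold invariant applies
    have := pv_fold_invariant board.length hn board []
      (by intro x hx; simp at hx)
    simp only [List.length_nil, Nat.cast_zero, List.nil_append] at this
    rw [show PySem.Chars.join [' '] (List.replicate board.length ['.']) = pvDotRow board.length
          from rfl, this]
    congr 1
    apply List.map_congr_left
    intro c _
    simp only [Function.comp_apply]
    -- per-row: A's joined cell list equals B's patched row, at character level
    by_cases h : 0 ≤ c ∧ c < (board.length : Int)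
    · rw [if_pos h]
      unfold pvRowA
      rw [if_pos h, PySem.List.pyRepeat_singleton,
        PySem.List.pySetD_of_nonneg _ _ h.1, PySem.Str.toList_join,
        List.map_set, List.map_replicate]
      rfl
    · rw [if_neg h]
      unfold pvRowA pvDotRow
      rw [if_neg h, PySem.List.pyRepeat_singleton, PySem.Str.toList_join, List.map_replicate]
      rfl
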